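-- pv_equiv track=rewrite | github.com/8lazej/8rew | procesChmielenie.py | oblicz_wykorzystanie
-- ===== SOURCE A (Python) =====
-- def oblicz_wykorzystanie(czas):
--     MAKSYMALNE_WYKORZYSTANIE = 34
--     table = [
--         [9, 6],
--         [19, 15],
--         [29, 19],
--         [44, 24],
--         [59, 27],
--         [74, 30],
--     ]
--
--     for [czas_gotowania, wykorzystanie] in table:
--         if (czas < czas_gotowania):
--             return wykorzystanie
--     return MAKSYMALNE_WYKORZYSTANIE
-- ===== SOURCE B (Python) =====
-- def oblicz_wykorzystanie(czas):
--     # Binary search (hand-rolled bisect_right) over sorted thresholds instead of a linear scan.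
--     thresholds = [9, 19, 29, 44, 59, 74]
--     outputs = [6, 15, 19, 24, 27, 30, 34]
--     lo, hi = 0, len(thresholds)
--     while lo < hi:
--         mid = (lo + hi) // 2
--         if czas < thresholds[mid]:
--             hi = mid
--         else:
--             lo = mid + 1
--     return outputs[lo]
-- ===== Notes on version B (the rewrite author's own statement) =====
-- stated objective: alternative
-- what changed: Replaced the linear scan of a [threshold, value] pair table with a hand-rolled bisect_right binary search over a sorted thresholds list, indexing a parallel outputs list (with 34 as the final sentinel entry).
import Mathlib
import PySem

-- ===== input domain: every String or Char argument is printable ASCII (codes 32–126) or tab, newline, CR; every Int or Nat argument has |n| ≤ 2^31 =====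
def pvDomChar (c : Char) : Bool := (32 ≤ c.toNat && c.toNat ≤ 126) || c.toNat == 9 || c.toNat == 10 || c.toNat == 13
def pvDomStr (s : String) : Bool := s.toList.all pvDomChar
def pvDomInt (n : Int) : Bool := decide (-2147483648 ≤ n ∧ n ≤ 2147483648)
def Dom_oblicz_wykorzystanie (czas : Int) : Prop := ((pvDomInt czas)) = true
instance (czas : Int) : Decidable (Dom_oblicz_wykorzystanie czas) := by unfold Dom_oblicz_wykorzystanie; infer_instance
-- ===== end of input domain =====

-- ===== PORT A =====
-- B replaces A's linear table scan with a binary search over sorted thresholds (alternative algorithm).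
def pvLoopA (czas : Int) : List (Int × Int) → Int
  | [] => 34
  | (t, w) :: rest => if czas < t then w else pvLoopA czas rest

def oblicz_wykorzystanie (czas : Int) : Int :=
  pvLoopA czas [(9, 6), (19, 15), (29, 19), (44, 24), (59, 27), (74, 30)]

-- ===== PORT B =====
def pvThresholds : List Int := [9, 19, 29, 44, 59, 74]
def pvOutputs : List Int := [6, 15, 19, 24, 27, 30, 34]

-- hand-rolled bisect_right loop from Source B
def pvBs (czas : Int) (lo hi : Nat) : Nat :=
  if _h : lo < hi then
    let mid := (lo + hi) / 2
    if czas < pvThresholds.getD mid 0 then pvBs czas lo mid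
    else pvBs czas (mid + 1) hi
  else lo
termination_by hi - lo
decreasing_by all_goals omega

def oblicz_wykorzystanie_alt (czas : Int) : Int :=
  pvOutputs.getD (pvBs czas 0 pvThresholds.length) 0

-- ===== PRECONDITION & SPEC =====
def Spec_oblicz_wykorzystanie (czas : Int) (out : Int) : Prop := out = oblicz_wykorzystanie_alt czas
instance (czas : Int) (out : Int) : Decidable (Spec_oblicz_wykorzystanie czas out) := by unfold Spec_oblicz_wykorzystanie; infer_instance

-- ===== CLAIM (what is proved, stated in full; the proofs are below) =====
def Claim_equal_oblicz_wykorzystanie : Prop := ∀ (czas : Int), Dom_oblicz_wykorzystanie czas → Spec_oblicz_wykorzystanie czas (oblicz_wykorzystanie czas)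

-- ===== LEMMAS AND PROOFS =====

-- ===== VERDICT (by name: the statement is the Claim_ definition above) =====
-- closed form of the binary search on the fixed 6-element threshold table
theorem pvBs_eval (czas : Int) : pvBs czas 0 6 =
    (if czas < 9 then 0 else if czas < 19 then 1 else if czas < 29 then 2
     else if czas < 44 then 3 else if czas < 59 then 4 else if czas < 74 then 5 else 6) := by
  unfold pvBs
  unfold pvBs
  unfold pvBs
  unfold pvBs
  norm_num [pvThresholds]
  split_ifs <;> omega

theorem oblicz_wykorzystanie_spec : Claim_equal_oblicz_wykorzystanie := by
  intro czas _
  unfold Spec_oblicz_wykorzystanie oblicz_wykorzystanie oblicz_wykorzystanie_alt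
  rw [show pvThresholds.length = 6 from rfl, pvBs_eval]
  split_ifs <;> simp [pvLoopA, pvOutputs] <;> omega
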